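-- pv_equiv track=rewrite | github.com/amirfardanian/fasttext | capture_model/post_processing.py | valid_cvr
-- ===== SOURCE A (Python) =====
-- def valid_cvr(cvr):
--     weights = [2, 7, 6, 5, 4, 3, 2]
--     cvr_digits = [int(digit) for digit in str(cvr)]
--     if len(cvr_digits) != 8:
--         return False
--     control_digit = cvr_digits.pop()
--     cvr_weighted_sum = sum(cvr_digit * weight for cvr_digit, weight in zip(cvr_digits, weights))
--     mod_11 = cvr_weighted_sum % 11
--     return (mod_11 == 0 and control_digit == 0) or (mod_11 != 1 and (11 - mod_11) == control_digit)
-- ===== SOURCE B (Python) =====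
-- def valid_cvr(cvr):
--     # Purely arithmetic: an 8-digit number is one in [10_000_000, 99_999_999].
--     # Extract digits right-to-left with divmod (weights reversed, control digit
--     # first with weight 1) and check the whole weighted sum divides by 11.
--     if cvr < 10_000_000 or cvr > 99_999_999:
--         return False
--     n, total = cvr, 0
--     for w in (1, 2, 3, 4, 5, 6, 7, 2):
--         n, d = divmod(n, 10)
--         total += d * w
--     return total % 11 == 0
-- ===== Notes on version B (the rewrite author's own statement) =====
-- stated objective: alternative
-- what changed: B never converts the number to a string: it checks the 8-digit property arithmetically (10_000_000 <= cvr <= 99_999_999), extracts digits right-to-left with divmod against the reversed weight vector (control digit first with weight 1), and tests the whole weighted sum with a single total % 11 == 0, replacing A's str/int digit list, pop() and two-case mod-11 branch.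
import Mathlib
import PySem

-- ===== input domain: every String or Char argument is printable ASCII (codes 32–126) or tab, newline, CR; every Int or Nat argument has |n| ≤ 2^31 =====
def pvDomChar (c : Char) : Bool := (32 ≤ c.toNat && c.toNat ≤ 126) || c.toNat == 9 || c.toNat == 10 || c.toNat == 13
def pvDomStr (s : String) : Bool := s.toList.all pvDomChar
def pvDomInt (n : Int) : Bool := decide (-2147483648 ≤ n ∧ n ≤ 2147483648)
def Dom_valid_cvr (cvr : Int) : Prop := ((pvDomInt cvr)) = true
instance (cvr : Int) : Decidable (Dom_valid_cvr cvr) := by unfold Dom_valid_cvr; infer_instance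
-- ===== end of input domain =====

-- B checks the checksum purely arithmetically (range test + divmod digit extraction, reversed
-- weights, one uniform mod-11 test) instead of A's str()-digit-list, pop() and two-case branch.

-- ===== PORT A =====
-- [int(digit) for digit in str(cvr)]  (int(d) raises on '-'; under Pre_ every char is a digit, getD 0 unused)
def pvCvrDigits (cvr : Int) : List Int :=
  (PySem.Int.toChars cvr).map (fun c => (PySem.Int.ofChars? [c]).getD 0)

def valid_cvr (cvr : Int) : Bool :=
  let weights : List Int := [2, 7, 6, 5, 4, 3, 2]
  let cvr_digits := pvCvrDigits cvr
  if cvr_digits.length ≠ 8 then false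
  else
    let control_digit := cvr_digits.getLast?.getD 0            -- cvr_digits.pop()
    let popped := cvr_digits.dropLast
    let cvr_weighted_sum := (popped.zip weights).foldl (fun acc dw => acc + dw.1 * dw.2) 0
    let mod_11 := PySem.Int.mod cvr_weighted_sum 11
    (mod_11 == 0 && control_digit == 0) || (mod_11 != 1 && (11 - mod_11) == control_digit)

-- ===== PORT B =====
def valid_cvr_alt (cvr : Int) : Bool :=
  if cvr < 10000000 || 99999999 < cvr then false
  else
    -- for w in (1,2,3,4,5,6,7,2): n, d = divmod(n, 10); total += d * w
    let st := ([1, 2, 3, 4, 5, 6, 7, 2] : List Int).foldl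
      (fun (st : Int × Int) w =>
        (PySem.Int.floordiv st.1 10, st.2 + PySem.Int.mod st.1 10 * w)) (cvr, 0)
    PySem.Int.mod st.2 11 == 0

-- ===== PRECONDITION & SPEC =====
-- Pre_ excludes exactly the negative inputs: str(cvr) then starts with '-' and int('-') raises ValueError in A.
def Pre_valid_cvr (cvr : Int) : Prop := 0 ≤ cvr
instance (cvr : Int) : Decidable (Pre_valid_cvr cvr) := by unfold Pre_valid_cvr; infer_instance
def pvWitness_valid_cvr : Int := 13585628
def Spec_valid_cvr (cvr : Int) (out : Bool) : Prop := out = valid_cvr_alt cvr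
instance (cvr : Int) (out : Bool) : Decidable (Spec_valid_cvr cvr out) := by unfold Spec_valid_cvr; infer_instance

-- ===== CLAIM (what is proved, stated in full; the proofs are below) =====
def Claim_equal_valid_cvr : Prop := ∀ (cvr : Int), Dom_valid_cvr cvr → Pre_valid_cvr cvr → Spec_valid_cvr cvr (valid_cvr cvr)

-- ===== LEMMAS AND PROOFS =====

-- digit value of one char, as A computes it
def pvDv (c : Char) : Int := (PySem.Int.ofChars? [c]).getD 0

def pvVal (ds : List Int) : Int := ds.foldl (fun a d => a * 10 + d) 0

lemma pvDv_digitChar (m : Nat) (h : m < 10) : pvDv (Nat.digitChar m) = (m : Int) := by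
  interval_cases m <;> decide

-- the decimal string produced by toDigitsCore, read back as digit values
lemma toDigitsCore_spec : ∀ (f n : Nat) (l : List Char), n < f →
    ∃ pre : List Int,
      (Nat.toDigitsCore 10 f n l).map pvDv = pre ++ l.map pvDv ∧
      pre ≠ [] ∧
      (∀ d ∈ pre, 0 ≤ d ∧ d ≤ 9) ∧
      pvVal pre = (n : Int) ∧
      n < 10 ^ pre.length ∧
      (pre.length = 1 ∨ 10 ^ (pre.length - 1) ≤ n) := by
  intro f
  induction f with
  | zero => intro n l h; omega
  | succ f ih =>
    intro n l _
    by_cases h10 : n / 10 = 0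
    · refine ⟨[(n : Int)], ?_, by simp, ?_, ?_, ?_, ?_⟩
      · simp [Nat.toDigitsCore, h10, Nat.mod_eq_of_lt (by omega : n < 10),
          pvDv_digitChar n (by omega)]
      · intro d hd; simp at hd; omega
      · simp [pvVal]
      · simpa using (by omega : n < 10)
      · left; rfl
    · obtain ⟨pre, heq, hne, hbd, hval, hub, hlb⟩ :=
        ih (n / 10) (Nat.digitChar (n % 10) :: l) (by omega)
      refine ⟨pre ++ [((n % 10 : Nat) : Int)], ?_, by simp, ?_, ?_, ?_, ?_⟩
      · have : Nat.toDigitsCore 10 (f + 1) n l =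
            Nat.toDigitsCore 10 f (n / 10) (Nat.digitChar (n % 10) :: l) := by
          conv_lhs => rw [Nat.toDigitsCore]
          simp [h10]
        rw [this, heq]
        simp [pvDv_digitChar (n % 10) (Nat.mod_lt _ (by norm_num))]
      · intro d hd
        rcases List.mem_append.mp hd with h | h
        · exact hbd d h
        · simp at h; omega
      · simp only [pvVal, List.foldl_append, List.foldl]
        rw [show pre.foldl (fun a d => a * 10 + d) 0 = pvVal pre from rfl, hval]
        push_cast
        omega
      · have h1 : n < 10 ^ pre.length * 10 := by
          have := (Nat.div_lt_iff_lt_mul (by norm_num : 0 < 10)).mp hub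
          omega
        simpa [pow_succ] using h1
      · right
        have hlen : (pre ++ [((n % 10 : Nat) : Int)]).length - 1 = pre.length := by simp
        rw [hlen]
        rcases hlb with h1 | h1
        · rw [h1]; simp; omega
        · have h2 : 10 ^ (pre.length - 1) * 10 ≤ n / 10 * 10 := Nat.mul_le_mul_right 10 h1
          have hpos : 0 < pre.length := List.length_pos_iff.mpr hne
          have h3 : 10 ^ (pre.length - 1) * 10 = 10 ^ pre.length := by
            rw [← pow_succ]; congr 1; omega
          have h4 : n / 10 * 10 ≤ n := Nat.div_mul_le_self n 10
          omega

lemma len_eight_iff (n L : Nat) (h1 : n < 10 ^ L) (h2 : L = 1 ∨ 10 ^ (L - 1) ≤ n) :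
    (L = 8 ↔ 10000000 ≤ n ∧ n < 100000000) := by
  constructor
  · rintro rfl
    rcases h2 with h | h
    · omega
    · norm_num at h h1
      omega
  · rintro ⟨hl, hu⟩
    by_contra hne
    rcases Nat.lt_or_ge L 8 with hL | hL
    · have h3 : 10 ^ L ≤ 10 ^ 7 := Nat.pow_le_pow_right (by norm_num) (by omega)
      norm_num at h3
      omega
    · have hL9 : 9 ≤ L := by omega
      rcases h2 with h | h
      · omega
      · have h3 : 10 ^ 8 ≤ 10 ^ (L - 1) := Nat.pow_le_pow_right (by norm_num) (by omega)
        norm_num at h3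
        omega

lemma digits_char (cvr : Int) (h : 0 ≤ cvr) :
    pvCvrDigits cvr = (Nat.toDigitsCore 10 (cvr.toNat + 1) cvr.toNat []).map pvDv := by
  unfold pvCvrDigits PySem.Int.toChars
  rw [if_neg (by omega)]
  rfl

lemma digit_extract (d0 d1 d2 d3 d4 d5 d6 d7 cvr : Int)
    (b0 : 0 ≤ d0 ∧ d0 ≤ 9) (b1 : 0 ≤ d1 ∧ d1 ≤ 9) (b2 : 0 ≤ d2 ∧ d2 ≤ 9)
    (b3 : 0 ≤ d3 ∧ d3 ≤ 9) (b4 : 0 ≤ d4 ∧ d4 ≤ 9) (b5 : 0 ≤ d5 ∧ d5 ≤ 9)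
    (b6 : 0 ≤ d6 ∧ d6 ≤ 9) (b7 : 0 ≤ d7 ∧ d7 ≤ 9)
    (hv : cvr = 10000000 * d0 + 1000000 * d1 + 100000 * d2 + 10000 * d3 + 1000 * d4 +
      100 * d5 + 10 * d6 + d7) :
    cvr % 10 = d7 ∧ cvr / 10 % 10 = d6 ∧ cvr / 10 / 10 % 10 = d5 ∧
    cvr / 10 / 10 / 10 % 10 = d4 ∧ cvr / 10 / 10 / 10 / 10 % 10 = d3 ∧
    cvr / 10 / 10 / 10 / 10 / 10 % 10 = d2 ∧ cvr / 10 / 10 / 10 / 10 / 10 / 10 % 10 = d1 ∧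
    cvr / 10 / 10 / 10 / 10 / 10 / 10 / 10 % 10 = d0 := by
  omega

lemma checksum_iff (d0 d1 d2 d3 d4 d5 d6 d7 : Int) (b7 : 0 ≤ d7 ∧ d7 ≤ 9) :
    ((0 + d0 * 2 + d1 * 7 + d2 * 6 + d3 * 5 + d4 * 4 + d5 * 3 + d6 * 2) % 11 = 0 ∧ d7 = 0 ∨
      ¬(0 + d0 * 2 + d1 * 7 + d2 * 6 + d3 * 5 + d4 * 4 + d5 * 3 + d6 * 2) % 11 = 1 ∧
        11 - (0 + d0 * 2 + d1 * 7 + d2 * 6 + d3 * 5 + d4 * 4 + d5 * 3 + d6 * 2) % 11 = d7) ↔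
    (0 + d7 * 1 + d6 * 2 + d5 * 3 + d4 * 4 + d3 * 5 + d2 * 6 + d1 * 7 + d0 * 2) % 11 = 0 := by
  omega

theorem valid_cvr_spec : Claim_equal_valid_cvr := by
  intro cvr _ hpre
  unfold Spec_valid_cvr valid_cvr valid_cvr_alt
  obtain ⟨pre, heq, _, hbd, hval, hub, hlb⟩ :=
    toDigitsCore_spec (cvr.toNat + 1) cvr.toNat [] (by omega)
  have hds : pvCvrDigits cvr = pre := by
    rw [digits_char cvr hpre, heq]; simp
  rw [hds]
  have hcast : ((cvr.toNat : Int)) = cvr := Int.toNat_of_nonneg hpre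
  have hiff := len_eight_iff cvr.toNat pre.length hub hlb
  by_cases h8 : pre.length = 8
  · have hrange : 10000000 ≤ cvr ∧ cvr ≤ 99999999 := by
      have := hiff.mp h8; omega
    rw [if_neg (by simp; omega), if_neg (by simp; omega)]
    match pre, h8 with
    | [d0, d1, d2, d3, d4, d5, d6, d7], _ =>
      have hb0 := hbd d0 (by simp); have hb1 := hbd d1 (by simp)
      have hb2 := hbd d2 (by simp); have hb3 := hbd d3 (by simp)
      have hb4 := hbd d4 (by simp); have hb5 := hbd d5 (by simp)
      have hb6 := hbd d6 (by simp); have hb7 := hbd d7 (by simp)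
      have hv : ((((((((0 * 10 + d0) * 10 + d1) * 10 + d2) * 10 + d3) * 10 + d4) * 10 + d5)
          * 10 + d6) * 10 + d7) = cvr := by
        rw [← hcast, ← hval]; simp [pvVal]
      have hv' : cvr = 10000000 * d0 + 1000000 * d1 + 100000 * d2 + 10000 * d3 + 1000 * d4 +
          100 * d5 + 10 * d6 + d7 := by omega
      simp only [List.zip, List.zipWith, List.foldl, List.getLast?, List.dropLast, Option.getD]
      simp only [PySem.Int.floordiv_eq_ediv_of_pos (by norm_num : (0:Int) < 10),
        PySem.Int.mod_eq_emod_of_pos (by norm_num : (0:Int) < 10),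
        PySem.Int.mod_eq_emod_of_pos (by norm_num : (0:Int) < 11)]
      obtain ⟨e7, e6, e5, e4, e3, e2, e1, e0⟩ :=
        digit_extract d0 d1 d2 d3 d4 d5 d6 d7 cvr hb0 hb1 hb2 hb3 hb4 hb5 hb6 hb7 hv'
      rw [Bool.eq_iff_iff]
      simp only [Bool.or_eq_true, Bool.and_eq_true, beq_iff_eq, bne_iff_ne, ne_eq]
      rw [e0, e1, e2, e3, e4, e5, e6, e7]
      exact checksum_iff d0 d1 d2 d3 d4 d5 d6 d7 hb7
  · rw [if_pos (by simpa using h8), if_pos]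
    have : ¬ (10000000 ≤ cvr.toNat ∧ cvr.toNat < 100000000) := fun hc => h8 (hiff.mpr hc)
    simp
    omega
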